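-- pv_equiv track=rewrite | github.com/Misterpetchz/Object_Oriented_Data_Structure | week8-avlTree/max-min-cost.py | max_cost
-- ===== SOURCE A (Python) =====
-- def max_cost(lst, result):
--     if len(lst) >= 2:
--         lst.sort()
--         new_val = lst.pop() + lst.pop()
--         lst.append(new_val)
--         result.append(new_val)
--         max_cost(lst, result)
--     return sum(result)
-- ===== SOURCE B (Python) =====
-- def max_cost(lst, result):
--     # Return-value-equivalent rewrite: sort once (descending), then keep the
--     # working list sorted by ordered insertion instead of re-sorting each round;
--     # the running total replaces the final sum(result) pass.
--     # Performs the same observable mutations as A: result gets each intermediate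
--     # sum appended in order, and lst ends as [grand total] when len(lst) >= 2.
--     total = sum(result)
--     if len(lst) >= 2:
--         work = sorted(lst, reverse=True)
--         while len(work) >= 2:
--             s = work[0] + work[1]
--             work = work[2:]
--             i = 0
--             while i < len(work) and work[i] > s:
--                 i += 1
--             work.insert(i, s)
--             result.append(s)
--             total += s
--         lst[:] = work
--     return total
-- ===== Notes on version B (the rewrite author's own statement) =====
-- stated objective: alternative
-- what changed: A re-sorts the whole list and recurses on every combine step; B sorts once, then iteratively pops the two largest and re-inserts their sum at its ordered position, keeping a running total instead of summing result at the end.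
import Mathlib
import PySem

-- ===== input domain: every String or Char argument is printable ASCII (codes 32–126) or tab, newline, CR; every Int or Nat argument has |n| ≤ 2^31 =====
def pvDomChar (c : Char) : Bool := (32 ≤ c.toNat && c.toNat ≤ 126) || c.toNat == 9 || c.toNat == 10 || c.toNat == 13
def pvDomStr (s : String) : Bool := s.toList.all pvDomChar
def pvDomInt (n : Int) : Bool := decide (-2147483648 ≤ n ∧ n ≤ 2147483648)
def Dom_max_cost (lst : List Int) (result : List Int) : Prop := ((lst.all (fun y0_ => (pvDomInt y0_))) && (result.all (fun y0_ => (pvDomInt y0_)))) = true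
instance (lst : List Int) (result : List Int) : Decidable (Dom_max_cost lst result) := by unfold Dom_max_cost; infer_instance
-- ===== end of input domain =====

-- B sorts once and maintains the sorted order by insertion instead of re-sorting each
-- step (return-value equivalence is proved; both versions also mutate lst/result the
-- same way in Python, which is not modelled here).

-- ===== PORT A =====
-- Literal port of A: sort ascending, pop the last two, append their sum, recurse, sum(result).
def max_cost (lst : List Int) (result : List Int) : Int :=
  if lst.length ≥ 2 then
    let s := PySem.List.sorted lst (fun x => x) false
    let a := s.getLastD 0                -- lst.pop()
    let s1 := s.dropLast
    let b := s1.getLastD 0               -- lst.pop()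
    let s2 := s1.dropLast
    max_cost (s2 ++ [a + b]) (result ++ [a + b])
  else result.sum
termination_by lst.length
decreasing_by
  simp [PySem.List.length_sorted, List.length_dropLast, List.length_append]
  omega

-- ===== PORT B =====
-- port of B's inner while loop: advance past elements > s, insert s there
def pvInsDesc (s : Int) (w : List Int) : List Int :=
  match w with
  | [] => [s]
  | x :: t => if s < x then x :: pvInsDesc s t else s :: x :: t

theorem pvInsDesc_length (s : Int) (w : List Int) : (pvInsDesc s w).length = w.length + 1 := by
  induction w with
  | nil => rfl
  | cons x t ih => simp only [pvInsDesc]; split <;> simp [ih]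

-- port of B's outer while loop, carrying the running total
def pvLoop (work : List Int) (total : Int) : Int :=
  match work with
  | a :: b :: rest => pvLoop (pvInsDesc (a + b) rest) (total + (a + b))
  | _ => total
termination_by work.length
decreasing_by simp [pvInsDesc_length]

def max_cost_alt (lst : List Int) (result : List Int) : Int :=
  if lst.length ≥ 2 then
    pvLoop (PySem.List.sorted lst (fun x => x) true) result.sum
  else result.sum

-- ===== PRECONDITION & SPEC =====
def Spec_max_cost (lst : List Int) (result : List Int) (out : Int) : Prop := out = max_cost_alt lst result
instance (lst : List Int) (result : List Int) (out : Int) : Decidable (Spec_max_cost lst result out) := by unfold Spec_max_cost; infer_instance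

-- ===== CLAIM (what is proved, stated in full; the proofs are below) =====
def Claim_equal_max_cost : Prop := ∀ (lst : List Int) (result : List Int), Dom_max_cost lst result → Spec_max_cost lst result (max_cost lst result)

-- ===== LEMMAS AND PROOFS =====

-- proof helpers: the sum of the intermediate values produced by each side
def gA (lst : List Int) : Int :=
  if lst.length ≥ 2 then
    let s := PySem.List.sorted lst (fun x => x) false
    let a := s.getLastD 0
    let s1 := s.dropLast
    let b := s1.getLastD 0
    let s2 := s1.dropLast
    (a + b) + gA (s2 ++ [a + b])
  else 0
termination_by lst.length
decreasing_by
  simp [PySem.List.length_sorted, List.length_dropLast, List.length_append]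
  omega

def gB (w : List Int) : Int :=
  match w with
  | a :: b :: rest => (a + b) + gB (pvInsDesc (a + b) rest)
  | _ => 0
termination_by w.length
decreasing_by simp [pvInsDesc_length]

theorem max_cost_eq_gA_aux : ∀ (n : Nat) (lst result : List Int), lst.length ≤ n →
    max_cost lst result = result.sum + gA lst := by
  intro n
  induction n with
  | zero =>
    intro lst result h
    rw [max_cost, gA]
    have h2 : ¬ lst.length ≥ 2 := by omega
    rw [if_neg h2, if_neg h2]
    omega
  | succ n IH =>
    intro lst result h
    rw [max_cost, gA]
    by_cases h2 : lst.length ≥ 2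
    · rw [if_pos h2, if_pos h2]
      dsimp only
      rw [IH _ _ ?hl]
      case hl =>
        simp [PySem.List.length_sorted, List.length_dropLast, List.length_append]
        omega
      rw [List.sum_append]
      simp
      ring
    · rw [if_neg h2, if_neg h2]
      omega

theorem max_cost_eq_gA (lst result : List Int) : max_cost lst result = result.sum + gA lst :=
  max_cost_eq_gA_aux lst.length lst result le_rfl

theorem pvLoop_eq_gB_aux : ∀ (n : Nat) (w : List Int) (total : Int), w.length ≤ n →
    pvLoop w total = total + gB w := by
  intro n
  induction n with
  | zero =>
    intro w total h
    match w with
    | [] => simp [pvLoop, gB]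
    | x :: t => simp at h
  | succ n IH =>
    intro w total h
    match w with
    | [] => simp [pvLoop, gB]
    | [x] => simp [pvLoop, gB]
    | a :: b :: rest =>
      simp only [pvLoop, gB]
      rw [IH _ _ ?hl]
      case hl =>
        rw [pvInsDesc_length]
        simp at h ⊢
        omega
      ring

theorem pvLoop_eq_gB (w : List Int) (total : Int) : pvLoop w total = total + gB w :=
  pvLoop_eq_gB_aux w.length w total le_rfl

theorem pvInsDesc_perm (s : Int) (w : List Int) : (pvInsDesc s w).Perm (s :: w) := by
  induction w with
  | nil => exact List.Perm.refl _
  | cons x t ih =>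
    simp only [pvInsDesc]
    split
    · exact (ih.cons x).trans (List.Perm.swap s x t)
    · exact List.Perm.refl _

theorem pvInsDesc_pairwise (s : Int) (w : List Int)
    (hw : w.Pairwise (fun a b => b ≤ a)) : (pvInsDesc s w).Pairwise (fun a b => b ≤ a) := by
  induction w with
  | nil => simp [pvInsDesc]
  | cons x t ih =>
    rw [List.pairwise_cons] at hw
    simp only [pvInsDesc]
    split
    · rename_i hx
      rw [List.pairwise_cons]
      refine ⟨?_, ih hw.2⟩
      intro y hy
      rcases List.mem_cons.1 ((pvInsDesc_perm s t).mem_iff.1 hy) with h | h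
      · omega
      · exact hw.1 y h
    · rename_i hx
      rw [List.pairwise_cons]
      refine ⟨?_, List.pairwise_cons.2 hw⟩
      intro y hy
      rcases List.mem_cons.1 hy with h | h
      · omega
      · have := hw.1 y h; omega

theorem sortedDesc_char (xs ys : List Int) (hp : ys.Perm xs)
    (hs : ys.Pairwise (fun a b => b ≤ a)) :
    PySem.List.sorted xs (fun x => x) true = ys := by
  exact List.Perm.eq_of_pairwise (fun a b _ _ h1 h2 => le_antisymm h2 h1)
    (PySem.List.sorted_pairwise_rev xs (fun x => x)) hs
    ((PySem.List.sorted_perm xs (fun x => x) true).trans hp.symm)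

theorem gA_eq_gB_aux : ∀ (n : Nat) (lst : List Int), lst.length ≤ n →
    gA lst = gB (PySem.List.sorted lst (fun x => x) true) := by
  intro n
  induction n with
  | zero =>
    intro lst h
    have hl : lst = [] := by cases lst <;> simp_all
    subst hl
    simp [gA, gB, PySem.List.sorted]
  | succ n IH =>
    intro lst h
    rw [gA]
    by_cases h2 : lst.length ≥ 2
    · have hlw : (PySem.List.sorted lst (fun x => x) true).length ≥ 2 := by
        rw [PySem.List.length_sorted]; exact h2
      cases hwe : PySem.List.sorted lst (fun x => x) true with
      | nil => rw [hwe] at hlw; simp at hlw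
      | cons a t =>
        cases t with
        | nil => rw [hwe] at hlw; simp at hlw
        | cons b rest =>
          have hdesc : (a :: b :: rest).Pairwise (fun x y : Int => y ≤ x) := by
            have := PySem.List.sorted_pairwise_rev lst (fun x : Int => x)
            rw [hwe] at this
            exact this
          have hperm : (a :: b :: rest).Perm lst := by
            have := PySem.List.sorted_perm lst (fun x : Int => x) true
            rw [hwe] at this
            exact this
          have hasc : PySem.List.sorted lst (fun x => x) false = (rest.reverse ++ [b]) ++ [a] := by
            have hrp : ((a :: b :: rest).reverse).Perm lst := (List.reverse_perm _).trans hperm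
            have hpw : ((a :: b :: rest).reverse).Pairwise (fun x y : Int => x ≤ y) :=
              (List.pairwise_reverse).2 hdesc
            have := PySem.List.sorted_id_eq_of_perm_of_pairwise lst ((a :: b :: rest).reverse) hrp hpw
            simpa [List.reverse_cons, List.append_assoc] using this
          rw [if_pos h2]
          dsimp only
          rw [hasc]
          rw [List.getLastD_concat, List.dropLast_concat, List.getLastD_concat,
            List.dropLast_concat]
          have hrest : rest.Pairwise (fun x y : Int => y ≤ x) :=
            (List.pairwise_cons.1 (List.pairwise_cons.1 hdesc).2).2
          have hins : PySem.List.sorted (rest.reverse ++ [a + b]) (fun x => x) true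
              = pvInsDesc (a + b) rest := by
            apply sortedDesc_char
            · exact (pvInsDesc_perm (a + b) rest).trans
                ((((List.reverse_perm rest).symm).cons (a + b)).trans
                  (List.perm_append_singleton _ _).symm)
            · exact pvInsDesc_pairwise (a + b) rest hrest
          rw [IH _ ?hl]
          case hl =>
            have := PySem.List.length_sorted lst (fun x : Int => x) true
            rw [hwe] at this
            simp at this ⊢
            omega
          rw [hins]
          simp only [gB]
    · rw [if_neg h2]
      have hlw : (PySem.List.sorted lst (fun x => x) true).length < 2 := by
        rw [PySem.List.length_sorted]; omega
      cases hwe : PySem.List.sorted lst (fun x => x) true with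
      | nil => simp [gB]
      | cons a t =>
        cases t with
        | nil => simp [gB]
        | cons b rest => rw [hwe] at hlw; simp at hlw

theorem gA_eq_gB (lst : List Int) : gA lst = gB (PySem.List.sorted lst (fun x => x) true) :=
  gA_eq_gB_aux lst.length lst le_rfl

theorem main_eq (lst result : List Int) : max_cost lst result = max_cost_alt lst result := by
  rw [max_cost_eq_gA, gA_eq_gB, max_cost_alt]
  split
  · rw [pvLoop_eq_gB]
  · rename_i h
    have hl : lst.length < 2 := by omega
    have hw : (PySem.List.sorted lst (fun x => x) true).length < 2 := by
      rw [PySem.List.length_sorted]; exact hl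
    match hwe : PySem.List.sorted lst (fun x => x) true with
    | [] => simp [gB]
    | [x] => simp [gB]
    | a :: b :: rest => rw [hwe] at hw; simp at hw

-- ===== VERDICT (by name: the statement is the Claim_ definition above) =====
theorem max_cost_spec : Claim_equal_max_cost := by
  intro lst result _
  exact main_eq lst result
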